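-- pv_equiv track=rewrite | github.com/pypi-data/pypi-mirror-379 | packages/syft-hub/syft_hub-0.1.4-py3-none-any.whl/syft_hub/core/pipeline.py | _prepare_enhanced_messages
-- ===== SOURCE A (Python) =====
-- from typing import List, Dict, Optional, Union, TYPE_CHECKING
--
-- def _prepare_enhanced_messages(original_messages: List[Dict[str, str]], context: str) -> List[Dict[str, str]]:
--     """Prepare messages with search context injected"""
--     if not context.strip():
--         return original_messages
--
--     # Find the last user message and enhance it with context
--     enhanced_messages = []
--     context_injected = False
--
--     for msg in original_messages:
--         if msg.get("role") == "user" and not context_injected: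
--             # Inject context before the user's message
--             enhanced_content = f"Context:\n{context}\n\nUser Question: {msg.get('content', '')}"
--             enhanced_messages.append({
--                 "role": "user",
--                 "content": enhanced_content
--             })
--             context_injected = True
--         else:
--             enhanced_messages.append(msg)
--
--     # If no user message found, add context as system message
--     if not context_injected:
--         enhanced_messages.insert(0, {
--             "role": "system",
--             "content": f"Use this context to answer questions:\n{context}"
--         })
--
--     return enhanced_messages
-- ===== SOURCE B (Python) =====
-- def _prepare_enhanced_messages(original_messages, context):
--     if not context.strip():
--         return original_messages
--     if not any(m.get("role") == "user" for m in original_messages):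
--         return [{"role": "system",
--                  "content": f"Use this context to answer questions:\n{context}"}] + list(original_messages)
--
--     def rewrite_first(msgs):
--         # msgs is guaranteed to contain a user message
--         head, tail = msgs[0], msgs[1:]
--         if head.get("role") == "user":
--             return [{"role": "user",
--                      "content": f"Context:\n{context}\n\nUser Question: {head.get('content', '')}"}] + tail
--         return [head] + rewrite_first(tail)
--
--     return rewrite_first(list(original_messages))
-- ===== Notes on version B (the rewrite author's own statement) =====
-- stated objective: alternative
-- what changed: Replaces A's single flag-threading accumulator loop by two stages: an any() existence pass deciding the no-user case up front, then a structural recursion that rebuilds the list and stops at the first user message, leaving the tail untouched; no boolean state is carried.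
import Mathlib
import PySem

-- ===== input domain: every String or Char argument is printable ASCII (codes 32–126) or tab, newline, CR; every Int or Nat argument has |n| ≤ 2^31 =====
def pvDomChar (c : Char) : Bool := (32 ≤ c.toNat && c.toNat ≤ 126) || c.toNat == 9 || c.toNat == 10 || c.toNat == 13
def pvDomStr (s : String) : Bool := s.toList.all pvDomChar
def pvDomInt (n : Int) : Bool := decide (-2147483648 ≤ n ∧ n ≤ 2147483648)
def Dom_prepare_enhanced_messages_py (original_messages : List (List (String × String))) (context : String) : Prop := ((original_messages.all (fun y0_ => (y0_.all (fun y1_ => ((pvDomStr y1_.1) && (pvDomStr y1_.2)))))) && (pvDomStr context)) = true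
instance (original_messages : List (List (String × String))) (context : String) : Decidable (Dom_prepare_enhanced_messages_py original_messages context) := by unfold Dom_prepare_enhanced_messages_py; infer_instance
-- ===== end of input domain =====

-- B replaces A's flag-threading accumulator loop by an any() existence pass plus a
-- structural recursion that rewrites the first user message and stops (objective: alternative).

-- shared dict primitive: msg.get(k) on an association list (first match)
def pvMsgGet? (m : List (String × String)) (k : String) : Option String :=
  (m.find? (fun p => p.1 == k)).map Prod.snd

-- msg.get(k, d)
def pvMsgGetD (m : List (String × String)) (k d : String) : String :=
  (pvMsgGet? m k).getD d

-- ===== PORT A =====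
def prepare_enhanced_messages_py (original_messages : List (List (String × String))) (context : String) : List (List (String × String)) :=
  if PySem.Str.strip context == "" then original_messages
  else
    let st := original_messages.foldl
      (fun (acc : List (List (String × String)) × Bool) msg =>
        if pvMsgGet? msg "role" == some "user" && !acc.2 then
          (acc.1 ++ [[("role", "user"),
            ("content", "Context:\n" ++ context ++ "\n\nUser Question: " ++ pvMsgGetD msg "content" "")]],
           true)
        else
          (acc.1 ++ [msg], acc.2))
      ([], false)
    if !st.2 then
      [("role", "system"), ("content", "Use this context to answer questions:\n" ++ context)] :: st.1
    else
      st.1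

-- ===== PORT B =====
-- B's inner recursion rewrite_first (on [] returns [] — Python never reaches it, the any() pass guards)
def pvRewriteFirst (context : String) : List (List (String × String)) → List (List (String × String))
  | [] => []
  | head :: tail =>
    if pvMsgGet? head "role" == some "user" then
      [("role", "user"),
       ("content", "Context:\n" ++ context ++ "\n\nUser Question: " ++ pvMsgGetD head "content" "")] :: tail
    else
      head :: pvRewriteFirst context tail

def prepare_enhanced_messages_py_alt (original_messages : List (List (String × String))) (context : String) : List (List (String × String)) :=
  if PySem.Str.strip context == "" then original_messages
  else if !original_messages.any (fun m => pvMsgGet? m "role" == some "user") then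
    [("role", "system"), ("content", "Use this context to answer questions:\n" ++ context)] :: original_messages
  else
    pvRewriteFirst context original_messages

-- ===== PRECONDITION & SPEC =====
def Spec_prepare_enhanced_messages_py (original_messages : List (List (String × String))) (context : String) (out : List (List (String × String))) : Prop := out = prepare_enhanced_messages_py_alt original_messages context
instance (original_messages : List (List (String × String))) (context : String) (out : List (List (String × String))) : Decidable (Spec_prepare_enhanced_messages_py original_messages context out) := by unfold Spec_prepare_enhanced_messages_py; infer_instance

-- ===== CLAIM =====
def Claim_equal_prepare_enhanced_messages_py : Prop := ∀ (original_messages : List (List (String × String))) (context : String), Dom_prepare_enhanced_messages_py original_messages context → Spec_prepare_enhanced_messages_py original_messages context (prepare_enhanced_messages_py original_messages context)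

-- ===== LEMMAS AND PROOFS =====

def pvIsUser (m : List (String × String)) : Bool := pvMsgGet? m "role" == some "user"

-- A's loop body
def pvStep (context : String) (acc : List (List (String × String)) × Bool) (msg : List (String × String)) : List (List (String × String)) × Bool :=
  if pvMsgGet? msg "role" == some "user" && !acc.2 then
    (acc.1 ++ [[("role", "user"),
      ("content", "Context:\n" ++ context ++ "\n\nUser Question: " ++ pvMsgGetD msg "content" "")]],
     true)
  else
    (acc.1 ++ [msg], acc.2)

theorem foldl_step_true (context : String) (msgs : List (List (String × String)))
    (acc : List (List (String × String))) :
    msgs.foldl (pvStep context) (acc, true) = (acc ++ msgs, true) := by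
  induction msgs generalizing acc with
  | nil => simp
  | cons m ms ih =>
    simp only [List.foldl_cons, pvStep, Bool.not_true, Bool.and_false, if_false, Bool.false_eq_true]
    rw [ih]; simp

theorem foldl_step_false (context : String) (msgs : List (List (String × String)))
    (acc : List (List (String × String))) :
    msgs.foldl (pvStep context) (acc, false) =
      if msgs.any pvIsUser then (acc ++ pvRewriteFirst context msgs, true)
      else (acc ++ msgs, false) := by
  induction msgs generalizing acc with
  | nil => simp
  | cons m ms ih =>
    by_cases hu : pvIsUser m
    · simp only [List.foldl_cons, pvStep, Bool.not_false, Bool.and_true]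
      rw [if_pos (by simpa [pvIsUser] using hu)]
      rw [foldl_step_true]
      simp [List.any_cons, hu, pvRewriteFirst, (by simpa [pvIsUser] using hu : pvMsgGet? m "role" == some "user")]
    · simp only [List.foldl_cons, pvStep, Bool.not_false, Bool.and_true]
      rw [if_neg (by simpa [pvIsUser] using hu)]
      rw [ih]
      have hm : (pvMsgGet? m "role" == some "user") = false := by simpa [pvIsUser] using hu
      by_cases ha : ms.any pvIsUser
      · simp [List.any_cons, hu, ha, pvRewriteFirst, hm]
      · simp [List.any_cons, hu, ha]

-- ===== VERDICT =====
theorem prepare_enhanced_messages_py_spec : Claim_equal_prepare_enhanced_messages_py := by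
  intro oms context _
  show prepare_enhanced_messages_py oms context = prepare_enhanced_messages_py_alt oms context
  unfold prepare_enhanced_messages_py prepare_enhanced_messages_py_alt
  by_cases hs : PySem.Str.strip context == ""
  · simp [hs]
  · simp only [hs, if_false, Bool.false_eq_true]
    have hfold : oms.foldl
        (fun (acc : List (List (String × String)) × Bool) msg =>
          if pvMsgGet? msg "role" == some "user" && !acc.2 then
            (acc.1 ++ [[("role", "user"),
              ("content", "Context:\n" ++ context ++ "\n\nUser Question: " ++ pvMsgGetD msg "content" "")]],
             true)
          else (acc.1 ++ [msg], acc.2)) ([], false)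
        = oms.foldl (pvStep context) ([], false) := rfl
    rw [hfold, foldl_step_false]
    by_cases ha : oms.any pvIsUser
    · have : oms.any (fun m => pvMsgGet? m "role" == some "user") = true := by
        simpa [pvIsUser] using ha
      simp [ha, this]
    · have : oms.any (fun m => pvMsgGet? m "role" == some "user") = false := by
        simpa [pvIsUser] using ha
      simp [ha, this]
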